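-- pv_equiv track=rewrite | github.com/a-gram/udsp | udsp/zombies/mtx.py | mat_flatten
-- ===== SOURCE A (Python) =====
-- def mat_is_void(a):
--     """
--     Check whether a given matrix is void
--
--     A matrix is considered as "void" if it is None or []
--
--     Parameters
--     ----------
--     a: list[list]
--         The matrix to be checked
--
--     Returns
--     -------
--     bool
--         True if the matrix is void, False otherwise
--
--     """
--     return a is None or len(a) == 0
--
-- def mat_dim(a):
--     """
--     Returns the dimensions of a matrix
--
--     Note: it is assumed that all the rows have equal size
--
--     Parameters
--     ----------
--     a: list[list]
--         A matrix
--
--     Returns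
--     -------
--     tuple
--         A 2-tuple (rows, cols)
--
--     """
--     if mat_is_void(a):
--         return ()
--     return len(a), len(a[0])
--
-- def mat_flatten(a, mode=(1, False)):
--     """
--     Flattens (vectorizes) a matrix
--
--     Parameters
--     ----------
--     a: list[list]
--         A matrix of scalar values
--     mode: tuple
--         A 2-tuple in the form (dim, inverted) indicating how to
--         perform the flattening. The 'dim' value must be either 1
--         or 2, where 1 means that the matrix is flattened using the
--         first dimension (rows) starting from the first. If it's 2
--         then it is flattened using the second dimension (columns)
--         starting from the first. The 'inverted' value indicates
--         whether to invert the order of the flattening, that is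
--         starting from the last row/column.
--
--     Returns
--     -------
--     list[]
--         A vectorized form of the given matrix
--
--     """
--     if mat_is_void(a):
--         return []
--     if len(mode) < 2 or not mode[0] in (1, 2):
--         raise ValueError("Invalid mode. Must be a 2-tuple "
--                          "in the form ({1,2}, {True,False})")
--
--     nrows, ncols = mat_dim(a)
--     dim, inverted = mode
--     vec = [None] * (nrows * ncols)
--
--     if dim == 1:
--         it = reversed(a) if inverted else a
--         for vo, row in enumerate(it):
--             dr = vo * ncols
--             vec[dr: dr + ncols] = row
--     else:
--         it = [[*reversed(row)] for row in a] if inverted else a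
--         for vo, col in enumerate(zip(*it)):
--             dr = vo * nrows
--             vec[dr: dr + nrows] = col
--     return vec
-- ===== SOURCE B (Python) =====
-- def mat_flatten(a, mode=(1, False)):
--     if a is None or len(a) == 0:
--         return []
--     if len(mode) < 2 or not mode[0] in (1, 2):
--         raise ValueError("Invalid mode. Must be a 2-tuple "
--                          "in the form ({1,2}, {True,False})")
--     dim, inverted = mode
--     n, m = len(a), len(a[0])
--     if dim == 1:
--         if inverted:
--             return [a[n - 1 - i // m][i % m] for i in range(n * m)]
--         return [a[i // m][i % m] for i in range(n * m)]
--     if inverted: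
--         return [a[i % n][m - 1 - i // n] for i in range(n * m)]
--     return [a[i % n][i // n] for i in range(n * m)]
-- ===== Notes on version B (the rewrite author's own statement) =====
-- stated objective: alternative
-- what changed: Replaces A's traversal machinery (preallocated buffer, enumerate loops, reversed(), per-row reversal and zip-transpose, slice assignment) with a single comprehension over the flat output index that gathers each element directly by closed-form index arithmetic (i//m, i%m and their inverted/transposed variants).
-- outside the precondition, e.g. on mat_flatten([[1, 2], [3], [4, 5]], (1, False)): A returns [1, 2, 3, None, 4, 5], B raises IndexError; on mat_flatten([[1]], (3, False)): A raises ValueError, B raises ValueError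
import Mathlib
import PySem

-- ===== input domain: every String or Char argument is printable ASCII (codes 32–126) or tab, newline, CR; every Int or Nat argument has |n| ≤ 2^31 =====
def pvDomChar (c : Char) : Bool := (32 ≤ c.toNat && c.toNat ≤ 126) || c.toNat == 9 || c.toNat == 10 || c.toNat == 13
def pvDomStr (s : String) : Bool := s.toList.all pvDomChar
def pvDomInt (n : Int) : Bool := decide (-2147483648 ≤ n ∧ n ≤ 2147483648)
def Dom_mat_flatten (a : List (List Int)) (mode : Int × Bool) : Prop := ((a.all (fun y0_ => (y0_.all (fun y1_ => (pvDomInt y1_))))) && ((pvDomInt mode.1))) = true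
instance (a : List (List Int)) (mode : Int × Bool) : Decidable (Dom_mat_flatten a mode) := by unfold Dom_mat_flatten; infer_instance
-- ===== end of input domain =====

-- B gathers each output element directly by closed-form index arithmetic over the flat
-- index (one comprehension), instead of A's preallocated buffer filled by enumerate
-- loops with slice assignment, reversed() and zip-transpose: alternative algorithm, same cost.

-- ===== PORT A =====

-- Python's zip(*ls): emit the list of heads while every list is nonempty (exact truncation semantics)
def pyZipStar (ls : List (List Int)) : List (List Int) :=
  if h : ls ≠ [] ∧ ls.all (fun l => !l.isEmpty) then
    (ls.map (fun l => l.headD 0)) :: pyZipStar (ls.map (fun l => l.tail))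
  else []
termination_by (ls.headD []).length
decreasing_by
  obtain ⟨hne, hall⟩ := h
  cases ls with
  | nil => exact absurd rfl hne
  | cons x xs =>
    simp only [List.headD_cons]
    have hx : !x.isEmpty := List.all_eq_true.mp hall x (by simp)
    cases x with
    | nil => simp at hx
    | cons y ys => simp

-- the enumerate loop 'for vo, row in enumerate(it): dr = vo*k; vec[dr:dr+k] = row';
-- vec holds Option Int because Python preallocates with None; slice assignment is
-- take/append/drop, exact for the nonnegative dr used here
def fillRows (k : Nat) : Nat → List (Option Int) → List (List Int) → List (Option Int)
  | _, vec, [] => vec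
  | vo, vec, row :: rest =>
      fillRows k (vo + 1) (vec.take (vo * k) ++ row.map some ++ vec.drop (vo * k + k)) rest

def mat_flatten (a : List (List Int)) (mode : Int × Bool) : List Int :=
  if a.length = 0 then []
  else if ¬ (mode.1 = 1 ∨ mode.1 = 2) then []  -- Python raises ValueError here; excluded by Pre_
  else
    let nrows := a.length
    let ncols := (a.headD []).length
    let vec := List.replicate (nrows * ncols) (none : Option Int)
    let vec :=
      if mode.1 = 1 then
        let it := if mode.2 then a.reverse else a
        fillRows ncols 0 vec it
      else
        let it := if mode.2 then a.map (fun row => row.reverse) else a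
        fillRows nrows 0 vec (pyZipStar it)
    -- on Pre_ every slot is filled with some; getD 0 only realizes the List Int return type
    vec.map (fun o => o.getD 0)

-- ===== PORT B =====
def mat_flatten_alt (a : List (List Int)) (mode : Int × Bool) : List Int :=
  if a.length = 0 then []
  else if ¬ (mode.1 = 1 ∨ mode.1 = 2) then []  -- Python raises ValueError here; excluded by Pre_
  else
    let n := a.length
    let m := (a.headD []).length
    if mode.1 = 1 then
      if mode.2 then
        (List.range (n * m)).map (fun i => (a.getD (n - 1 - i / m) []).getD (i % m) 0)
      else
        (List.range (n * m)).map (fun i => (a.getD (i / m) []).getD (i % m) 0)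
    else
      if mode.2 then
        (List.range (n * m)).map (fun i => (a.getD (i % n) []).getD (m - 1 - i / n) 0)
      else
        (List.range (n * m)).map (fun i => (a.getD (i % n) []).getD (i / n) 0)

-- ===== PRECONDITION & SPEC =====
-- Pre_ excludes (1) modes with dim ∉ {1,2} on a non-void matrix, where A raises ValueError, and
-- (2) non-rectangular matrices — outside A's documented "all rows have equal size" assumption —
-- where A's slice-assignment/zip-truncation can return lists still containing None (not ints)
-- and B's direct indexing raises IndexError.
def Pre_mat_flatten (a : List (List Int)) (mode : Int × Bool) : Prop :=
  (a = [] ∨ mode.1 = 1 ∨ mode.1 = 2) ∧ ∀ r ∈ a, r.length = (a.headD []).length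
instance (a : List (List Int)) (mode : Int × Bool) : Decidable (Pre_mat_flatten a mode) := by
  unfold Pre_mat_flatten; infer_instance

def pvWitness_mat_flatten : List (List Int) × (Int × Bool) := ([[1, 2], [3, 4]], (2, true))

def Spec_mat_flatten (a : List (List Int)) (mode : Int × Bool) (out : List Int) : Prop := out = mat_flatten_alt a mode
instance (a : List (List Int)) (mode : Int × Bool) (out : List Int) : Decidable (Spec_mat_flatten a mode out) := by unfold Spec_mat_flatten; infer_instance

-- ===== CLAIM (what is proved, stated in full; the proofs are below) =====
def Claim_equal_mat_flatten : Prop := ∀ (a : List (List Int)) (mode : Int × Bool), Dom_mat_flatten a mode → Pre_mat_flatten a mode → Spec_mat_flatten a mode (mat_flatten a mode)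

-- ===== LEMMAS AND PROOFS =====

-- the fill loop over rows of uniform length k turns the replicate-none buffer into the flatten
theorem fillRows_flatten (k : Nat) (rows : List (List Int)) :
    ∀ (vo : Nat) (pre : List (Option Int)),
      pre.length = vo * k → (∀ r ∈ rows, r.length = k) →
      fillRows k vo (pre ++ List.replicate (rows.length * k) none) rows
        = pre ++ (rows.flatMap id).map some := by
  induction rows with
  | nil => intro vo pre hpre _; simp [fillRows]
  | cons row rest ih =>
    intro vo pre hpre hlen
    have hrow : row.length = k := hlen row (by simp)
    have hrest : ∀ r ∈ rest, r.length = k := fun r hr => hlen r (by simp [hr])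
    simp only [fillRows]
    have hrep : (row :: rest).length * k = k + rest.length * k := by
      simp [List.length_cons, Nat.succ_mul, Nat.add_comm]
    rw [hrep]
    have htake : (pre ++ List.replicate (k + rest.length * k) none).take (vo * k) = pre := by
      rw [← hpre, List.take_left]
    have hdrop : (pre ++ List.replicate (k + rest.length * k) none).drop (vo * k + k)
        = List.replicate (rest.length * k) (none : Option Int) := by
      rw [← hpre, List.drop_length_add_append, List.drop_replicate]
      congr 1; omega
    rw [htake, hdrop]
    have h2 : (pre ++ row.map some).length = (vo + 1) * k := by
      simp [hpre, hrow, Nat.succ_mul]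
    have := ih (vo + 1) (pre ++ row.map some) h2 hrest
    simp only [List.append_assoc] at this ⊢
    rw [this]
    simp

-- zip(*a) on a rectangular nonempty matrix: the list of its k columns
theorem pyZipStar_rect (k : Nat) :
    ∀ (a : List (List Int)), a ≠ [] → (∀ r ∈ a, r.length = k) →
      pyZipStar a = (List.range k).map (fun j => a.map (fun r => r.getD j 0)) := by
  induction k with
  | zero =>
    intro a hne hlen
    rw [pyZipStar]
    rw [dif_neg]
    · simp
    · intro ⟨_, hall⟩
      cases a with
      | nil => exact hne rfl
      | cons x xs =>
        have hx := List.all_eq_true.mp hall x (by simp)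
        have : x.length = 0 := hlen x (by simp)
        cases x with
        | nil => simp at hx
        | cons y ys => simp at this
  | succ k ih =>
    intro a hne hlen
    rw [pyZipStar, dif_pos]
    · have hne' : a.map List.tail ≠ [] := by
        cases a with
        | nil => exact absurd rfl hne
        | cons x xs => simp
      have hlen' : ∀ r ∈ a.map List.tail, r.length = k := by
        intro r hr
        obtain ⟨s, hs, rfl⟩ := List.mem_map.mp hr
        have := hlen s hs
        cases s with
        | nil => simp at this
        | cons y ys => simpa using this
      rw [ih (a.map List.tail) hne' hlen']
      rw [List.range_succ_eq_map]
      simp only [List.map_cons, List.map_map]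
      congr 1
      · apply List.map_congr_left
        intro r hr
        have := hlen r hr
        cases r with
        | nil => simp at this
        | cons y ys => simp
      · apply List.map_congr_left
        intro j _
        simp only [Function.comp_apply]
        apply List.map_congr_left
        intro r hr
        have := hlen r hr
        cases r with
        | nil => simp at this
        | cons y ys => simp
    · constructor
      · exact hne
      · rw [List.all_eq_true]
        intro l hl
        have := hlen l hl
        cases l with
        | nil => simp at this
        | cons y ys => simp

-- the filled buffer, read back through getD 0, is the flatten of the rows
theorem fill_read (k n : Nat) (rows : List (List Int)) (hn : n = rows.length * k)
    (hlen : ∀ r ∈ rows, r.length = k) :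
    (fillRows k 0 (List.replicate n none) rows).map (fun o => o.getD 0)
      = rows.flatMap id := by
  subst hn
  have := fillRows_flatten k rows 0 [] (by simp) hlen
  simp only [List.nil_append] at this
  rw [this, List.map_map]
  simp

-- flatten of uniform-length rows as a closed-form gather over the flat index
theorem flatMap_closed (k : Nat) (rows : List (List Int)) (hlen : ∀ r ∈ rows, r.length = k) :
    rows.flatMap id
      = (List.range (rows.length * k)).map (fun i => (rows.getD (i / k) []).getD (i % k) 0) := by
  by_cases hk : k = 0
  · subst hk
    simp only [Nat.mul_zero, List.range_zero, List.map_nil]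
    rw [List.flatMap_eq_nil_iff]
    intro r hr
    have := hlen r hr
    simpa using List.length_eq_zero_iff.mp this
  · induction rows with
    | nil => simp
    | cons row rest ih =>
      have hrow : row.length = k := hlen row (by simp)
      have hrest : ∀ r ∈ rest, r.length = k := fun r hr => hlen r (by simp [hr])
      have hcount : (row :: rest).length * k = k + rest.length * k := by
        simp [List.length_cons, Nat.succ_mul, Nat.add_comm]
      rw [hcount, List.range_add, List.map_append, List.map_map]
      have h1 : (List.range k).map (fun i => ((row :: rest).getD (i / k) []).getD (i % k) 0)
          = row := by
        apply List.ext_getElem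
        · simp [hrow]
        · intro i h1 h2
          simp only [List.getElem_map, List.getElem_range]
          have hik : i < k := by simpa using h1
          rw [Nat.div_eq_of_lt hik, Nat.mod_eq_of_lt hik]
          simp only [List.getD_cons_zero]
          exact List.getD_eq_getElem _ _ (by omega)
      have h2 : (List.range (rest.length * k)).map
            ((fun i => ((row :: rest).getD (i / k) []).getD (i % k) 0) ∘ (fun j => k + j))
          = rest.flatMap id := by
        rw [ih hrest]
        apply List.map_congr_left
        intro j _
        simp only [Function.comp_apply]
        have hdiv : (k + j) / k = j / k + 1 := by
          rw [Nat.add_comm, Nat.add_div_right _ (Nat.pos_of_ne_zero hk)]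
        have hmod : (k + j) % k = j % k := Nat.add_mod_left k j
        rw [hdiv, hmod]
        rfl
      rw [h1, h2]
      simp [List.flatMap_cons]

-- getD through a map of range, and getD through a map, both at in-range indices
theorem getD_range_map (f : Nat → List Int) (m j : Nat) (hj : j < m) :
    ((List.range m).map f).getD j [] = f j := by
  rw [List.getD_eq_getElem _ _ (by simpa using hj)]
  simp

theorem getD_map_row (a : List (List Int)) (g : List Int → Int) (r : Nat) (hr : r < a.length) :
    (a.map g).getD r 0 = g (a.getD r []) := by
  rw [List.getD_eq_getElem _ _ (by simpa using hr), List.getD_eq_getElem _ _ hr]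
  simp

theorem getD_rev (a : List (List Int)) (j : Nat) (hj : j < a.length) :
    a.reverse.getD j [] = a.getD (a.length - 1 - j) [] := by
  rw [List.getD_eq_getElem _ _ (by simpa using hj),
      List.getD_eq_getElem _ _ (by omega : a.length - 1 - j < a.length)]
  rw [List.getElem_reverse]

theorem range_rev (n : Nat) : (List.range n).reverse = (List.range n).map (fun j => n - 1 - j) := by
  induction n with
  | zero => simp
  | succ n ih =>
    have h1 : (List.range (n+1)).reverse = n :: (List.range n).reverse := by
      rw [List.range_succ]; simp
    have h2 : (List.range (n+1)).map (fun j => n + 1 - 1 - j)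
        = n :: (List.range n).map (fun j => n - 1 - j) := by
      rw [List.range_succ_eq_map]
      simp [List.map_map, Function.comp]
      intro a _; omega
    rw [h1, h2, ih]

theorem getD_reverse (r : List Int) (k j : Nat) (hk : r.length = k) (hj : j < k) :
    r.reverse.getD j 0 = r.getD (k - 1 - j) 0 := by
  rw [List.getD_eq_getElem _ _ (by simpa [hk] using hj),
      List.getD_eq_getElem _ _ (by omega)]
  rw [List.getElem_reverse]
  congr 1
  omega

-- zipping the row-reversed matrix yields the columns in reverse order (rectangular case)
theorem pyZipStar_map_reverse (k : Nat) (a : List (List Int)) (hne : a ≠ [])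
    (hlen : ∀ r ∈ a, r.length = k) :
    pyZipStar (a.map List.reverse) = (pyZipStar a).reverse := by
  have hne' : a.map List.reverse ≠ [] := by
    cases a with
    | nil => exact absurd rfl hne
    | cons x xs => simp
  have hlen' : ∀ r ∈ a.map List.reverse, r.length = k := by
    intro r hr
    obtain ⟨s, hs, rfl⟩ := List.mem_map.mp hr
    simpa using hlen s hs
  rw [pyZipStar_rect k _ hne' hlen', pyZipStar_rect k a hne hlen]
  rw [← List.map_reverse, range_rev, List.map_map]
  apply List.map_congr_left
  intro j hj
  simp only [Function.comp, List.map_map]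
  apply List.map_congr_left
  intro r hr
  exact getD_reverse r k j (hlen r hr) (List.mem_range.mp hj)

theorem mat_flatten_spec : Claim_equal_mat_flatten := by
  intro a mode _ hpre
  obtain ⟨hdim0, hrect⟩ := hpre
  unfold Spec_mat_flatten mat_flatten mat_flatten_alt
  by_cases ha : a.length = 0
  · simp [ha]
  · rw [if_neg ha, if_neg ha]
    have hne : a ≠ [] := fun h => ha (by simp [h])
    have hnpos : 0 < a.length := Nat.pos_of_ne_zero ha
    have hd : mode.1 = 1 ∨ mode.1 = 2 := by
      rcases hdim0 with h | h
      · exact absurd h hne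
      · exact h
    rw [if_neg (not_not_intro hd), if_neg (not_not_intro hd)]
    set n := a.length with hn
    set m := (a.headD []).length with hm
    rcases hd with h1 | h2
    · -- dim = 1: gather row-major
      rw [h1]
      cases hb : mode.2 with
      | false =>
        simp only [Bool.false_eq_true, if_false, if_true]
        rw [fill_read m (n * m) a rfl hrect, flatMap_closed m a hrect]
      | true =>
        simp only [reduceIte]
        rw [fill_read m (n * m) a.reverse (by rw [List.length_reverse])
            (fun r hr => hrect r (List.mem_reverse.mp hr)),
          flatMap_closed m a.reverse (fun r hr => hrect r (List.mem_reverse.mp hr))]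
        simp only [List.length_reverse]
        apply List.map_congr_left
        intro i hi
        have hi' : i < n * m := List.mem_range.mp hi
        have hmpos : 0 < m := by
          rcases Nat.eq_zero_or_pos m with h | h
          · rw [h] at hi'; omega
          · exact h
        have hdiv : i / m < n := (Nat.div_lt_iff_lt_mul hmpos).mpr hi'
        rw [getD_rev a (i / m) hdiv]
    · -- dim = 2: gather column-major
      rw [h2]
      have hcols := pyZipStar_rect m a hne hrect
      have hclen : ∀ c ∈ pyZipStar a, c.length = n := by
        intro c hc
        rw [hcols] at hc
        obtain ⟨j, _, rfl⟩ := List.mem_map.mp hc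
        simp only [List.length_map]
        rfl
      have hzlen : (pyZipStar a).length = m := by rw [hcols]; simp
      have key : ∀ (pvF : Nat → Nat) (cols : List (List Int)), cols.length = m →
          (∀ c ∈ cols, c.length = n) →
          (∀ i < n * m, cols.getD (i / n) [] = a.map (fun r => r.getD (pvF i) 0)) →
          (fillRows n 0 (List.replicate (n * m) none) cols).map (fun o => o.getD 0)
            = (List.range (n * m)).map (fun i => (a.getD (i % n) []).getD (pvF i) 0) := by
        intro pvF cols hclenm hcn hcol
        rw [fill_read n (n * m) cols (by rw [hclenm, Nat.mul_comm]) hcn,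
          flatMap_closed n cols hcn, hclenm, Nat.mul_comm m n]
        apply List.map_congr_left
        intro i hi
        have hi' : i < n * m := List.mem_range.mp hi
        rw [hcol i hi', getD_map_row a _ (i % n) (Nat.mod_lt i hnpos)]
      cases hb : mode.2 with
      | false =>
        refine key (fun i => i / n) (pyZipStar a) hzlen hclen ?_
        intro i hi
        have hjm : i / n < m := by
          rw [Nat.div_lt_iff_lt_mul hnpos, Nat.mul_comm]; exact hi
        rw [hcols, getD_range_map _ m (i / n) hjm]
      | true =>
        simp only [reduceIte]
        rw [pyZipStar_map_reverse m a hne hrect]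
        refine key (fun i => m - 1 - i / n) ((pyZipStar a).reverse)
          (by rw [List.length_reverse, hzlen])
          (fun c hc => hclen c (List.mem_reverse.mp hc)) ?_
        intro i hi
        have hmpos : 0 < m := by
          rcases Nat.eq_zero_or_pos m with h | h
          · rw [h] at hi; omega
          · exact h
        have hjm : i / n < m := by
          rw [Nat.div_lt_iff_lt_mul hnpos, Nat.mul_comm]; exact hi
        rw [hcols, getD_rev _ (i / n) (by simpa using hjm)]
        simp only [List.length_map, List.length_range]
        exact getD_range_map _ m (m - 1 - i / n)
          (Nat.lt_of_le_of_lt (Nat.sub_le _ _) (Nat.sub_lt hmpos Nat.one_pos))
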